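-- pv_equiv track=rewrite | github.com/AeneasHDC/Reconfigurable_HDC_Platform | src/model/python/classes/auxiliary_functions.py | create_lut_efficient
-- ===== SOURCE A (Python) =====
-- def create_lut_efficient(bits):
--     max_val = 2 ** bits
--     lookup_table = {}
--     current_exponent = 0
--     next_power_of_two = 1
--
--     for i in range(0, max_val + 1):
--         # Check if we should move to the next exponent
--         if i == next_power_of_two:
--             current_exponent += 1
--             next_power_of_two = 2 ** current_exponent
--
--         # Check for the nearest power of two
--         lower_power_of_two = 2 ** (current_exponent - 1) if current_exponent > 0 else 0
--         higher_power_of_two = 2 ** current_exponent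
--
--         if i - lower_power_of_two <= higher_power_of_two - i:
--             nearest_exponent = current_exponent - 1
--         else:
--             nearest_exponent = current_exponent
--
--         # Correct handling for the case when i = 0
--         if i == 0:
--             nearest_exponent = 0
--
--         # Update the range in the lookup table
--         if nearest_exponent not in lookup_table:
--             lookup_table[nearest_exponent] = [i, i]
--         else:
--             lookup_table[nearest_exponent][1] = i
--
--     return lookup_table
-- ===== SOURCE B (Python) =====
-- def create_lut_efficient(bits):
--     max_val = 2 ** bits
--     lut = {0: [0, min(1, max_val)]}
--     for e in range(1, bits + 1):
--         start = 2 if e == 1 else 3 * 2 ** (e - 2) + 1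
--         end = min(3 * 2 ** (e - 1), max_val)
--         lut[e] = [start, end]
--     return lut
-- ===== Notes on version B (the rewrite author's own statement) =====
-- stated objective: faster
-- what changed: B computes each exponent's [start,end] range directly from the rounding-midpoint thresholds (start = 3*2^(e-2)+1, end = min(3*2^(e-1), 2^bits)) in a loop over the bits+1 exponents instead of scanning all 2^bits+1 values; intended as asymptotically faster (O(bits) vs O(2^bits)) - a timing run saw A time out at the larger sizes where B returned, so no clean ratio was measured.
import Mathlib
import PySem

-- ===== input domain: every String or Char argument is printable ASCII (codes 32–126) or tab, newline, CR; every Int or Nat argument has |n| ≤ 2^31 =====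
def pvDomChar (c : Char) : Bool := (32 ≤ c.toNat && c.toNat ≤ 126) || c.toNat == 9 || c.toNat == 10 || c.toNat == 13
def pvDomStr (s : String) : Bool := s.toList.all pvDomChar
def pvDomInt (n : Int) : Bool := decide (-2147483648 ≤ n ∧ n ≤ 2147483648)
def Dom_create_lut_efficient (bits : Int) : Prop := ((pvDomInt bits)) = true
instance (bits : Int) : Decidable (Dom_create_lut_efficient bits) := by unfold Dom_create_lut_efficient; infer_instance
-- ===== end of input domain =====

-- B replaces A's scan over all 2^bits+1 values by a direct computation of each
-- exponent's [start, end] range from the rounding-midpoint thresholds (objective: faster;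
-- intended as O(bits) vs O(2^bits) - a timing run saw A time out where B returned,
-- so no ratio was measured).


-- ===== PORT A =====
-- loop body of A: state = (lookup_table, current_exponent, next_power_of_two)
def pvStepA (s : PySem.Dict Int (List Int) × Int × Int) (i : Int) : PySem.Dict Int (List Int) × Int × Int :=
  let d := s.1
  let ce := if i = s.2.2 then s.2.1 + 1 else s.2.1
  let np := if i = s.2.2 then (2 : Int) ^ ce.toNat else s.2.2
  let lower := if ce > 0 then (2 : Int) ^ (ce - 1).toNat else 0
  let higher := (2 : Int) ^ ce.toNat
  let ne₀ := if i - lower ≤ higher - i then ce - 1 else ce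
  let ne := if i = 0 then 0 else ne₀
  let d' := match d.get? ne with
            | none => d.insert ne [i, i]          -- lookup_table[ne] = [i, i]
            | some v => d.insert ne (v.set 1 i)   -- lookup_table[ne][1] = i
  (d', ce, np)

def create_lut_efficient (bits : Int) : List (Int × List Int) :=
  let max_val := (2 : Int) ^ bits.toNat   -- 2 ** bits (Pre_ demands 0 ≤ bits)
  ((PySem.List.pyRange 0 (max_val + 1) 1).foldl pvStepA (PySem.Dict.empty, 0, 1)).1.items

-- ===== PORT B =====
def create_lut_efficient_alt (bits : Int) : List (Int × List Int) :=
  let max_val := (2 : Int) ^ bits.toNat   -- 2 ** bits (Pre_ demands 0 ≤ bits)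
  let lut : PySem.Dict Int (List Int) := PySem.Dict.empty.insert 0 [0, min 1 max_val]
  ((PySem.List.pyRange 1 (bits + 1) 1).foldl (fun d e =>
      let start := if e = 1 then (2 : Int) else 3 * (2 : Int) ^ (e - 2).toNat + 1
      let stop := min (3 * (2 : Int) ^ (e - 1).toNat) max_val
      d.insert e [start, stop]) lut).items

-- ===== PRECONDITION & SPEC =====
-- Pre_ excludes bits < 0, where A raises TypeError (2 ** bits is a float, so range() rejects it).
def Pre_create_lut_efficient (bits : Int) : Prop := 0 ≤ bits
instance (bits : Int) : Decidable (Pre_create_lut_efficient bits) := by unfold Pre_create_lut_efficient; infer_instance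
def pvWitness_create_lut_efficient : Int := 3

def Spec_create_lut_efficient (bits : Int) (out : List (Int × List Int)) : Prop := out = create_lut_efficient_alt bits
instance (bits : Int) (out : List (Int × List Int)) : Decidable (Spec_create_lut_efficient bits out) := by unfold Spec_create_lut_efficient; infer_instance

-- ===== CLAIM (what is proved, stated in full; the proofs are below) =====
def Claim_equal_create_lut_efficient : Prop := ∀ (bits : Int), Dom_create_lut_efficient bits → Pre_create_lut_efficient bits → Spec_create_lut_efficient bits (create_lut_efficient bits)

-- ===== LEMMAS AND PROOFS =====

-- closed forms: start / full (unclipped) end of exponent e's range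
def pvStart (e : Nat) : Int := if e = 0 then 0 else if e = 1 then 2 else 3 * 2 ^ (e - 2) + 1
def pvEndF (e : Nat) : Int := if e = 0 then 1 else 3 * 2 ^ (e - 1)

-- table with full ends for exponents 0..b
def pvTblFull : Nat → PySem.Dict Int (List Int)
  | 0 => PySem.Dict.empty.insert 0 [0, 1]
  | b + 1 => (pvTblFull b).insert ((b : Int) + 1) [pvStart (b + 1), pvEndF (b + 1)]

-- A's table after the loop up to 2^b: last entry clipped at 2^b
def pvTbl (b : Nat) : PySem.Dict Int (List Int) :=
  (pvTblFull b).insert (b : Int) [pvStart b, (2 : Int) ^ b]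

lemma pvTblFull_get?_of_lt (b : Nat) (k : Int) (h : (b : Int) < k) :
    (pvTblFull b).get? k = none := by
  induction b with
  | zero =>
    rw [pvTblFull, PySem.Dict.get?_insert_of_ne _ _ (by omega), PySem.Dict.get?_empty]
  | succ b ih =>
    rw [pvTblFull, PySem.Dict.get?_insert_of_ne _ _ (by push_cast at h ⊢; omega)]
    exact ih (by push_cast at h ⊢; omega)

-- a maximal run of iterations that only update the end of entry k
lemma pvRun (k x : Int) (n : Nat) : ∀ (a : Int) (d : PySem.Dict Int (List Int)) (y ce np : Int),
    0 < a → a + n ≤ np →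
    (∀ i : Int, a ≤ i → i < a + n →
      (if (i - (if ce > 0 then (2 : Int) ^ (ce - 1).toNat else 0)) ≤ (2 : Int) ^ ce.toNat - i
       then ce - 1 else ce) = k) →
    d.get? k = some [x, y] →
    (PySem.List.pyRange a (a + n) 1).foldl pvStepA (d, ce, np)
      = (if n = 0 then d else d.insert k [x, a + n - 1], ce, np) := by
  induction n with
  | zero =>
    intro a d y ce np ha hnp hne hget
    simp [PySem.List.pyRange]
  | succ n ih =>
    intro a d y ce np ha hnp hne hget
    have hsplit : PySem.List.pyRange a (a + (n + 1 : Nat)) 1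
        = a :: PySem.List.pyRange (a + 1) (a + (n + 1 : Nat)) 1 := by
      exact PySem.List.pyRange_one_cons (by push_cast; omega)
    have hstep : pvStepA (d, ce, np) a = (d.insert k [x, a], ce, np) := by
      have hne' := hne a (le_refl _) (by push_cast; omega)
      simp only [pvStepA]
      have h1 : ¬ (a = np) := by push_cast at hnp; omega
      have h2 : ¬ (a = 0) := by omega
      simp only [if_neg h1, if_neg h2, hne', hget]
      rfl
    rw [hsplit, List.foldl_cons, hstep]
    have : a + (n + 1 : Nat) = (a + 1) + (n : Nat) := by push_cast; omega
    rw [this]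
    rw [ih (a + 1) (d.insert k [x, a]) a ce np (by omega) (by push_cast at hnp ⊢; omega)
      (fun i h1 h2 => hne i (by omega) (by push_cast at h2 ⊢; omega))
      (PySem.Dict.get?_insert_self _ _ _)]
    cases n with
    | zero => simp
    | succ m =>
      simp only [if_neg (by omega : ¬ (m + 1 + 1 = 0)), if_neg (by omega : ¬ (m + 1 = 0)),
        PySem.Dict.insert_insert_self]

-- the A-side invariant: after the loop over 0..2^b the state is (pvTbl b, b+1, 2^(b+1))

lemma pvEndF_c3 (c : Nat) : pvEndF (c + 3) = 3 * 2 ^ (c + 2) := by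
  simp only [pvEndF, if_neg (by omega : ¬ c + 3 = 0)]
  rw [show c + 3 - 1 = c + 2 from by omega]

lemma pvStart_c4 (c : Nat) : pvStart (c + 4) = 3 * 2 ^ (c + 2) + 1 := by
  simp only [pvStart, if_neg (by omega : ¬ c + 4 = 0), if_neg (by omega : ¬ c + 4 = 1)]
  rw [show c + 4 - 2 = c + 2 from by omega]

lemma pvLoopA_succ (c : Nat)
    (ih : (PySem.List.pyRange 0 ((2 : Int) ^ (c + 3) + 1) 1).foldl pvStepA (PySem.Dict.empty, 0, 1)
      = (pvTbl (c + 3), (c : Int) + 3 + 1, (2 : Int) ^ (c + 4))) :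
    (PySem.List.pyRange 0 ((2 : Int) ^ (c + 4) + 1) 1).foldl pvStepA (PySem.Dict.empty, 0, 1)
      = (pvTbl (c + 4), (c : Int) + 4 + 1, (2 : Int) ^ (c + 5)) := by
  have hx : (0 : Int) < 2 ^ c := pow_pos (by norm_num) c
  have p2 : (2 : Int) ^ (c + 2) = 2 ^ c * 4 := by rw [pow_add]; norm_num
  have p3 : (2 : Int) ^ (c + 3) = 2 ^ c * 8 := by rw [pow_add]; norm_num
  have p4 : (2 : Int) ^ (c + 4) = 2 ^ c * 16 := by rw [pow_add]; norm_num
  have p5 : (2 : Int) ^ (c + 5) = 2 ^ c * 32 := by rw [pow_add]; norm_num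
  -- split off the already-done prefix 0..2^(c+3)
  have s1 : PySem.List.pyRange 0 ((2 : Int) ^ (c + 4) + 1) 1
      = PySem.List.pyRange 0 ((2 : Int) ^ (c + 3) + 1) 1
        ++ PySem.List.pyRange ((2 : Int) ^ (c + 3) + 1) ((2 : Int) ^ (c + 4) + 1) 1 :=
    PySem.List.pyRange_one_append _ _ _ (by linarith) (by linarith)
  -- split the tail at the rounding midpoint t = 3*2^(c+2)
  have s2 : PySem.List.pyRange ((2 : Int) ^ (c + 3) + 1) ((2 : Int) ^ (c + 4) + 1) 1
      = PySem.List.pyRange ((2 : Int) ^ (c + 3) + 1) (3 * (2 : Int) ^ (c + 2) + 1) 1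
        ++ PySem.List.pyRange (3 * (2 : Int) ^ (c + 2) + 1) ((2 : Int) ^ (c + 4) + 1) 1 :=
    PySem.List.pyRange_one_append _ _ _ (by linarith) (by linarith)
  have s3 : PySem.List.pyRange (3 * (2 : Int) ^ (c + 2) + 1) ((2 : Int) ^ (c + 4) + 1) 1
      = (3 * (2 : Int) ^ (c + 2) + 1)
        :: PySem.List.pyRange (3 * (2 : Int) ^ (c + 2) + 1 + 1) ((2 : Int) ^ (c + 4) + 1) 1 :=
    PySem.List.pyRange_one_cons (by linarith)
  have s4 : PySem.List.pyRange (3 * (2 : Int) ^ (c + 2) + 1 + 1) ((2 : Int) ^ (c + 4) + 1) 1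
      = PySem.List.pyRange (3 * (2 : Int) ^ (c + 2) + 1 + 1) ((2 : Int) ^ (c + 4)) 1
        ++ [(2 : Int) ^ (c + 4)] :=
    PySem.List.pyRange_one_succ_right (by linarith)
  -- E1: the run that extends entry c+3 up to the midpoint
  have hget1 : (pvTbl (c + 3)).get? ((c : Int) + 3) = some [pvStart (c + 3), (2 : Int) ^ (c + 3)] := by
    have hk : ((c + 3 : Nat) : Int) = (c : Int) + 3 := by push_cast; ring
    rw [pvTbl, hk]
    exact PySem.Dict.get?_insert_self _ _ _
  have hE1 := pvRun ((c : Int) + 3) (pvStart (c + 3)) (2 ^ (c + 2)) ((2 : Int) ^ (c + 3) + 1)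
    (pvTbl (c + 3)) ((2 : Int) ^ (c + 3)) ((c : Int) + 3 + 1) ((2 : Int) ^ (c + 4))
    (by linarith)
    (by push_cast; linarith)
    (by
      intro i h1 h2
      push_cast at h2
      have t1 : (((c : Int) + 3 + 1) - 1).toNat = c + 3 := by omega
      have t2 : ((c : Int) + 3 + 1).toNat = c + 4 := by omega
      rw [if_pos (by omega : ((c : Int) + 3 + 1) > 0), t1, t2,
        if_pos (by linarith : i - (2 : Int) ^ (c + 3) ≤ (2 : Int) ^ (c + 4) - i)]
      ring)
    hget1
  have hend1 : ((2 : Int) ^ (c + 3) + 1) + ((2 ^ (c + 2) : Nat) : Int) = 3 * (2 : Int) ^ (c + 2) + 1 := by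
    push_cast; linarith
  rw [hend1] at hE1
  rw [if_neg (by positivity : ¬ (2 ^ (c + 2) : Nat) = 0)] at hE1
  rw [show (3 * (2 : Int) ^ (c + 2) + 1 - 1) = 3 * 2 ^ (c + 2) by ring] at hE1
  -- E2: the midpoint + 1 opens entry c+4
  have hnone : (((pvTbl (c + 3)).insert ((c : Int) + 3) [pvStart (c + 3), 3 * 2 ^ (c + 2)]).get?
      ((c : Int) + 3 + 1)) = none := by
    rw [PySem.Dict.get?_insert_of_ne _ _ (by omega : (c : Int) + 3 + 1 ≠ (c : Int) + 3), pvTbl,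
      PySem.Dict.get?_insert_of_ne _ _ (by push_cast; omega)]
    exact pvTblFull_get?_of_lt _ _ (by push_cast; omega)
  have hE2 : pvStepA ((pvTbl (c + 3)).insert ((c : Int) + 3) [pvStart (c + 3), 3 * 2 ^ (c + 2)],
        (c : Int) + 3 + 1, (2 : Int) ^ (c + 4)) (3 * (2 : Int) ^ (c + 2) + 1)
      = (((pvTbl (c + 3)).insert ((c : Int) + 3) [pvStart (c + 3), 3 * 2 ^ (c + 2)]).insert
          ((c : Int) + 3 + 1) [3 * (2 : Int) ^ (c + 2) + 1, 3 * (2 : Int) ^ (c + 2) + 1],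
        (c : Int) + 3 + 1, (2 : Int) ^ (c + 4)) := by
    have t1 : (((c : Int) + 3 + 1) - 1).toNat = c + 3 := by omega
    have t2 : ((c : Int) + 3 + 1).toNat = c + 4 := by omega
    simp only [pvStepA,
      if_neg (by linarith : ¬ (3 * (2 : Int) ^ (c + 2) + 1 = (2 : Int) ^ (c + 4))),
      if_neg (by linarith : ¬ (3 * (2 : Int) ^ (c + 2) + 1 = (0 : Int))),
      if_pos (by omega : ((c : Int) + 3 + 1) > 0), t1, t2,
      if_neg (by linarith : ¬ ((3 * (2 : Int) ^ (c + 2) + 1) - (2 : Int) ^ (c + 3)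
        ≤ (2 : Int) ^ (c + 4) - (3 * (2 : Int) ^ (c + 2) + 1))),
      hnone]
  -- E3: the run that extends entry c+4 up to 2^(c+4)-1
  have h2le : (2 : Nat) ≤ 2 ^ (c + 2) := by
    calc (2 : Nat) = 2 ^ 1 := rfl
    _ ≤ 2 ^ (c + 2) := Nat.pow_le_pow_right (by norm_num) (by omega)
  have hcastn : ((2 ^ (c + 2) - 2 : Nat) : Int) = (2 : Int) ^ (c + 2) - 2 := by
    rw [Nat.cast_sub h2le]; push_cast; ring
  have hE3 := pvRun ((c : Int) + 3 + 1) (3 * (2 : Int) ^ (c + 2) + 1) (2 ^ (c + 2) - 2)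
    (3 * (2 : Int) ^ (c + 2) + 1 + 1)
    (((pvTbl (c + 3)).insert ((c : Int) + 3) [pvStart (c + 3), 3 * 2 ^ (c + 2)]).insert
      ((c : Int) + 3 + 1) [3 * (2 : Int) ^ (c + 2) + 1, 3 * (2 : Int) ^ (c + 2) + 1])
    (3 * (2 : Int) ^ (c + 2) + 1) ((c : Int) + 3 + 1) ((2 : Int) ^ (c + 4))
    (by linarith)
    (by rw [hcastn]; linarith)
    (by
      intro i h1 h2
      rw [hcastn] at h2
      have t1 : (((c : Int) + 3 + 1) - 1).toNat = c + 3 := by omega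
      have t2 : ((c : Int) + 3 + 1).toNat = c + 4 := by omega
      rw [if_pos (by omega : ((c : Int) + 3 + 1) > 0), t1, t2,
        if_neg (by linarith : ¬ (i - (2 : Int) ^ (c + 3) ≤ (2 : Int) ^ (c + 4) - i))])
    (PySem.Dict.get?_insert_self _ _ _)
  have hend3 : (3 * (2 : Int) ^ (c + 2) + 1 + 1) + ((2 ^ (c + 2) - 2 : Nat) : Int)
      = (2 : Int) ^ (c + 4) := by rw [hcastn]; linarith
  rw [hend3] at hE3
  rw [if_neg (by omega : ¬ (2 ^ (c + 2) - 2 : Nat) = 0)] at hE3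
  rw [PySem.Dict.insert_insert_self] at hE3
  -- E4: the final element 2^(c+4) bumps the exponent state and closes entry c+4
  have hE4 : pvStepA (((pvTbl (c + 3)).insert ((c : Int) + 3) [pvStart (c + 3), 3 * 2 ^ (c + 2)]).insert
        ((c : Int) + 3 + 1) [3 * (2 : Int) ^ (c + 2) + 1, (2 : Int) ^ (c + 4) - 1],
        (c : Int) + 3 + 1, (2 : Int) ^ (c + 4)) ((2 : Int) ^ (c + 4))
      = (((pvTbl (c + 3)).insert ((c : Int) + 3) [pvStart (c + 3), 3 * 2 ^ (c + 2)]).insert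
          ((c : Int) + 3 + 1) [3 * (2 : Int) ^ (c + 2) + 1, (2 : Int) ^ (c + 4)],
        (c : Int) + 4 + 1, (2 : Int) ^ (c + 5)) := by
    have t1 : (((c : Int) + 3 + 1 + 1) - 1).toNat = c + 4 := by omega
    have t2 : ((c : Int) + 3 + 1 + 1).toNat = c + 5 := by omega
    have hk : ((c : Int) + 3 + 1 + 1) - 1 = (c : Int) + 3 + 1 := by ring
    simp only [pvStepA, if_true]
    rw [if_neg (show ¬ ((2 : Int) ^ (c + 4) = 0) by linarith),
      if_pos (show ((c : Int) + 3 + 1 + 1) > 0 by omega), t1, t2,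
      if_pos (show (2 : Int) ^ (c + 4) - 2 ^ (c + 4) ≤ 2 ^ (c + 5) - 2 ^ (c + 4) by linarith),
      hk, PySem.Dict.get?_insert_self]
    simp only [List.set, Prod.mk.injEq]
    exact ⟨PySem.Dict.insert_insert_self _ _ _ _, by ring, trivial⟩
  -- assemble
  rw [s1, List.foldl_append, ih, s2, List.foldl_append, hE1, s3, List.foldl_cons, hE2, s4,
    List.foldl_append, hE3, List.foldl_cons, List.foldl_nil, hE4]
  -- the resulting table is pvTbl (c+4)
  have hfull : (pvTbl (c + 3)).insert ((c : Int) + 3) [pvStart (c + 3), 3 * 2 ^ (c + 2)]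
      = pvTblFull (c + 3) := by
    have hk : ((c + 3 : Nat) : Int) = (c : Int) + 3 := by push_cast; ring
    have h3 : pvTblFull (c + 3)
        = (pvTblFull (c + 2)).insert (((c + 2 : Nat) : Int) + 1) [pvStart (c + 3), pvEndF (c + 3)] := rfl
    rw [pvTbl, hk, PySem.Dict.insert_insert_self, h3, pvEndF_c3,
      show (((c + 2 : Nat) : Int) + 1) = (c : Int) + 3 by push_cast; ring,
      PySem.Dict.insert_insert_self]
  have htbl : ((pvTbl (c + 3)).insert ((c : Int) + 3) [pvStart (c + 3), 3 * 2 ^ (c + 2)]).insert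
      ((c : Int) + 3 + 1) [3 * (2 : Int) ^ (c + 2) + 1, (2 : Int) ^ (c + 4)] = pvTbl (c + 4) := by
    have h4 : pvTblFull (c + 4)
        = (pvTblFull (c + 3)).insert (((c + 3 : Nat) : Int) + 1) [pvStart (c + 4), pvEndF (c + 4)] := rfl
    rw [hfull, pvTbl, h4, pvStart_c4,
      show (((c + 3 : Nat) : Int) + 1) = (c : Int) + 3 + 1 by push_cast; ring,
      show ((c + 4 : Nat) : Int) = (c : Int) + 3 + 1 by push_cast; ring,
      PySem.Dict.insert_insert_self]
  rw [htbl]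

lemma pvLoopA (b : Nat) :
    (PySem.List.pyRange 0 ((2 : Int) ^ b + 1) 1).foldl pvStepA (PySem.Dict.empty, 0, 1)
      = (pvTbl b, (b : Int) + 1, (2 : Int) ^ (b + 1)) := by
  induction b with
  | zero => decide
  | succ b ih =>
    by_cases hb : b < 3
    · interval_cases b <;> decide
    · obtain ⟨c, rfl⟩ : ∃ c, b = c + 3 := ⟨b - 3, by omega⟩
      have hn1 : c + 3 + 1 = c + 4 := by omega
      have hn2 : c + 4 + 1 = c + 5 := by omega
      rw [hn1] at ih ⊢
      rw [hn2] at ⊢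
      push_cast at ih ⊢
      exact pvLoopA_succ c ih

-- B-side:-- B-side: the fold with clipping bound M
def pvTblMin (M : Int) : Nat → PySem.Dict Int (List Int)
  | 0 => PySem.Dict.empty.insert 0 [0, min 1 M]
  | c + 1 => (pvTblMin M c).insert ((c : Int) + 1) [pvStart (c + 1), min (pvEndF (c + 1)) M]

lemma pvLoopB (M : Int) (c : Nat) :
    (PySem.List.pyRange 1 ((c : Int) + 1) 1).foldl (fun d e =>
      let start := if e = 1 then (2 : Int) else 3 * (2 : Int) ^ (e - 2).toNat + 1
      let stop := min (3 * (2 : Int) ^ (e - 1).toNat) M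
      d.insert e [start, stop]) (PySem.Dict.empty.insert 0 [0, min 1 M])
      = pvTblMin M c := by
  induction c with
  | zero => simp [PySem.List.pyRange, pvTblMin]
  | succ c ih =>
    have hsplit : PySem.List.pyRange 1 ((c : Int) + 1 + 1) 1
        = PySem.List.pyRange 1 ((c : Int) + 1) 1 ++ [(c : Int) + 1] := by
      exact PySem.List.pyRange_one_succ_right (by omega)
    rw [show ((c + 1 : Nat) : Int) + 1 = (c : Int) + 1 + 1 by push_cast; ring, hsplit,
      List.foldl_append, ih, List.foldl_cons, List.foldl_nil]
    simp only [pvTblMin]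
    congr 1
    rcases Nat.eq_zero_or_pos c with hc | hc
    · subst hc; norm_num [pvStart, pvEndF]
    · have h1 : ¬ ((c : Int) + 1 = 1) := by omega
      have e2 : ((c : Int) + 1 - 2).toNat = c + 1 - 2 := by omega
      have e1 : ((c : Int) + 1 - 1).toNat = c := by omega
      simp only [if_neg h1, e1, e2, pvStart, pvEndF,
        if_neg (by omega : ¬ (c + 1 = 0)), if_neg (by omega : ¬ (c + 1 = 1))]
      norm_num

lemma pvTblMin_eq_full (c : Nat) (M : Int) (h1 : 1 ≤ M)
    (h2 : ∀ e : Nat, 1 ≤ e → e ≤ c → pvEndF e ≤ M) :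
    pvTblMin M c = pvTblFull c := by
  induction c with
  | zero => simp [pvTblMin, pvTblFull, min_eq_left h1]
  | succ c ih =>
    rw [pvTblMin, pvTblFull, ih (fun e he hec => h2 e he (by omega)),
      min_eq_left (h2 (c + 1) (by omega) (le_refl _))]

lemma pow_le_pow_two_int {a b : Nat} (h : a ≤ b) : (2 : Int) ^ a ≤ 2 ^ b :=
  pow_le_pow_right₀ (by norm_num) h

lemma pvTblMin_eq_tbl (b : Nat) : pvTblMin ((2 : Int) ^ b) b = pvTbl b := by
  cases b with
  | zero => decide
  | succ c =>
    rw [pvTblMin, pvTblMin_eq_full c _ (by simpa using pow_le_pow_two_int (Nat.zero_le (c+1)))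
      (by
        intro e he hec
        simp only [pvEndF, if_neg (by omega : ¬ e = 0)]
        calc (3 : Int) * 2 ^ (e - 1) ≤ 4 * 2 ^ (e - 1) := by nlinarith [pow_pos (by norm_num : (0:Int) < 2) (e-1)]
          _ = 2 ^ (e + 1) := by rw [show e + 1 = (e - 1) + 2 by omega, pow_add]; ring
          _ ≤ 2 ^ (c + 1) := pow_le_pow_two_int (by omega))]
    have hmin : min (pvEndF (c + 1)) ((2 : Int) ^ (c + 1)) = 2 ^ (c + 1) := by
      apply min_eq_right
      simp only [pvEndF, if_neg (by omega : ¬ c + 1 = 0), Nat.add_sub_cancel]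
      have := pow_pos (by norm_num : (0:Int) < 2) c
      rw [pow_succ]; nlinarith
    rw [hmin, pvTbl, pvTblFull]
    push_cast
    rw [PySem.Dict.insert_insert_self]

-- ===== VERDICT (by name: the statement is the Claim_ definition above) =====
theorem create_lut_efficient_spec : Claim_equal_create_lut_efficient := by
  intro bits _ hpre
  obtain ⟨b, rfl⟩ : ∃ b : Nat, bits = (b : Int) := ⟨bits.toNat, (Int.toNat_of_nonneg hpre).symm⟩
  show _ = _
  simp only [create_lut_efficient, create_lut_efficient_alt, Int.toNat_natCast,
    pvLoopA b, pvLoopB ((2:Int)^b) b, pvTblMin_eq_tbl b]
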